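-- pv_equiv track=rewrite | github.com/rickmansfield/U5.3-M2 | Homework/Task3.py | queueOnStacks
-- ===== SOURCE A (Python) =====
-- class Stack:
--     def __init__(self):
--         self.items = []
--
--     def isEmpty(self):
--         return self.items == []
--
--     def push(self, item):
--         self.items.append(item)
--
--     def pop(self):
--         return self.items.pop()
--
-- def queueOnStacks(requests):
--     left = Stack()
--     right = Stack()
--
--     def insert(x):
--         left.push(x)
--
--     def remove():
--         if not left.isEmpty():
--             right.push(left.items.pop(0))
--             return right.pop()
--
--     ans = []
--     for request in requests:
--         req = request.split(" ")
--         if req[0] == 'push':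
--             insert(int(req[1]))
--         else:
--             ans.append(remove())
--     return ans
-- ===== SOURCE B (Python) =====
-- def queueOnStacks(requests):
--     # No queue structure at all: record the full push history and an index k of
--     # how many elements have been successfully dequeued so far.
--     pushed = []
--     k = 0
--     ans = []
--     for request in requests:
--         req = request.split(" ")
--         if req[0] == 'push':
--             pushed.append(int(req[1]))
--         elif k < len(pushed):
--             ans.append(pushed[k])
--             k += 1
--         else:
--             ans.append(None)
--     return ans
-- ===== Notes on version B (the rewrite author's own statement) =====
-- stated objective: alternative
-- what changed: B keeps no queue at all: it records the append-only push history and a cursor k of successful pops, so a pop just reads pushed[k] (or None) instead of A's pop(0) front removal through two stacks.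
import Mathlib
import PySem

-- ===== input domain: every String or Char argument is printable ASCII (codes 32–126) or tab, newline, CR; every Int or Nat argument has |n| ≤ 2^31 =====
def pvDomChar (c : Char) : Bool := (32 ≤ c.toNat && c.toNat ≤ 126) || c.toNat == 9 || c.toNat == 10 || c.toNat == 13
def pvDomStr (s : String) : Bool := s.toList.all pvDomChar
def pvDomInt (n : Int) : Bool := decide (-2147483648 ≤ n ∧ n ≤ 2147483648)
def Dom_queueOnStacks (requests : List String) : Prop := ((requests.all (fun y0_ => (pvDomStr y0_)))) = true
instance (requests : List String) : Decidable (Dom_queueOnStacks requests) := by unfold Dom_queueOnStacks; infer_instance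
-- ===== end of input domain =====

-- B keeps no queue structure: the append-only push history plus a cursor of
-- successful pops replaces A's front-popped list and transient stack (alternative decomposition).

-- req = request.split(" ")  (sep nonempty, so split? is always some) — shared parse helper
def queueOnStacksReq (request : String) : List String :=
  (PySem.Str.split? request " ").getD []

-- ===== PORT A =====
-- A's loop state: left (queue list, front = head, push appends at end), right
-- (transient stack, top = head), and the answer accumulator.
def queueOnStacksLoopA : List String → List Int → List Int → List (Option Int) → List (Option Int)
  | [], _, _, ans => ans
  | request :: rest, left, right, ans =>
    let req := queueOnStacksReq request
    if (PySem.List.pyGet? req 0).getD "" = "push" then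
      queueOnStacksLoopA rest
        (left ++ [(PySem.Int.ofStr? ((PySem.List.pyGet? req 1).getD "")).getD 0]) right ans
    else
      match left with
      | [] => queueOnStacksLoopA rest [] right (ans ++ [none])
      | x :: l' =>
        -- right.push(left.items.pop(0)); return right.pop()
        let right' := x :: right
        queueOnStacksLoopA rest l' right'.tail (ans ++ [some (right'.headD 0)])

def queueOnStacks (requests : List String) : List (Option Int) :=
  queueOnStacksLoopA requests [] [] []

-- ===== PORT B =====
-- One step of B's for-loop, as a fold step over (pushed, k, ans).
def queueOnStacksStepB (st : List Int × Nat × List (Option Int)) (request : String) :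
    List Int × Nat × List (Option Int) :=
  let req := queueOnStacksReq request
  if (PySem.List.pyGet? req 0).getD "" = "push" then
    (st.1 ++ [(PySem.Int.ofStr? ((PySem.List.pyGet? req 1).getD "")).getD 0], st.2.1, st.2.2)
  else if st.2.1 < st.1.length then
    (st.1, st.2.1 + 1, st.2.2 ++ [some (st.1.getD st.2.1 0)])
  else
    (st.1, st.2.1, st.2.2 ++ [none])

def queueOnStacks_alt (requests : List String) : List (Option Int) :=
  (requests.foldl queueOnStacksStepB ([], 0, [])).2.2

-- ===== PRECONDITION & SPEC =====
-- Pre_ excludes exactly the inputs where A raises: a 'push' request whose second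
-- space-separated token is missing (IndexError) or not int()-parsable (ValueError).
def Pre_queueOnStacks (requests : List String) : Prop :=
  ∀ r ∈ requests,
    (PySem.List.pyGet? (queueOnStacksReq r) 0).getD "" = "push" →
    2 ≤ (queueOnStacksReq r).length ∧
    (PySem.Int.ofStr? ((PySem.List.pyGet? (queueOnStacksReq r) 1).getD "")).isSome = true
instance (requests : List String) : Decidable (Pre_queueOnStacks requests) := by
  unfold Pre_queueOnStacks; infer_instance

def pvWitness_queueOnStacks : List String := ["push 3", "pop", "push -2", "pop", "pop"]

def Spec_queueOnStacks (requests : List String) (out : List (Option Int)) : Prop := out = queueOnStacks_alt requests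
instance (requests : List String) (out : List (Option Int)) : Decidable (Spec_queueOnStacks requests out) := by unfold Spec_queueOnStacks; infer_instance

-- ===== CLAIM (what is proved, stated in full; the proofs are below) =====
def Claim_equal_queueOnStacks : Prop := ∀ (requests : List String), Dom_queueOnStacks requests → Pre_queueOnStacks requests → Spec_queueOnStacks requests (queueOnStacks requests)

-- ===== LEMMAS AND PROOFS =====

-- Loop invariant: A's pending queue (front to back) is the push history with the
-- first k (= successful-pop count) elements dropped.
lemma queueOnStacks_loop_eq (rest : List String) :
    ∀ (pushed : List Int) (k : Nat) (right : List Int) (ans : List (Option Int)),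
      k ≤ pushed.length →
      queueOnStacksLoopA rest (pushed.drop k) right ans
        = (rest.foldl queueOnStacksStepB (pushed, k, ans)).2.2 := by
  induction rest with
  | nil => intro pushed k right ans _; rfl
  | cons request rest ih =>
    intro pushed k right ans hk
    by_cases hp : (PySem.List.pyGet? (queueOnStacksReq request) 0).getD "" = "push"
    · have hdrop :
        pushed.drop k ++ [(PySem.Int.ofStr? ((PySem.List.pyGet? (queueOnStacksReq request) 1).getD "")).getD 0]
          = (pushed ++ [(PySem.Int.ofStr? ((PySem.List.pyGet? (queueOnStacksReq request) 1).getD "")).getD 0]).drop k := by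
        rw [List.drop_append_of_le_length hk]
      simp only [queueOnStacksLoopA, List.foldl_cons, queueOnStacksStepB, hp, if_pos]
      rw [hdrop]
      exact ih _ k right ans (by simpa using Nat.le_succ_of_le hk)
    · by_cases hlt : k < pushed.length
      · have hdrop : pushed.drop k = pushed[k] :: pushed.drop (k + 1) :=
          (List.getElem_cons_drop hlt).symm
        have hget : pushed.getD k 0 = pushed[k] := List.getD_eq_getElem pushed 0 hlt
        simp only [queueOnStacksLoopA, List.foldl_cons, queueOnStacksStepB, hp, if_false, hlt, if_pos, hdrop, hget, List.headD_cons, List.tail_cons]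
        exact ih pushed (k + 1) right (ans ++ [some pushed[k]]) hlt
      · have hkl : k = pushed.length := le_antisymm hk (not_lt.mp hlt)
        have hdrop : pushed.drop k = [] := by simp [hkl]
        simp only [queueOnStacksLoopA, List.foldl_cons, queueOnStacksStepB, hp, if_false, hlt, hdrop]
        simpa [hdrop] using ih pushed k right (ans ++ [none]) hk

-- ===== VERDICT (by name: the statement is the Claim_ definition above) =====
theorem queueOnStacks_spec : Claim_equal_queueOnStacks := by
  intro requests _ _
  unfold Spec_queueOnStacks queueOnStacks queueOnStacks_alt
  simpa using queueOnStacks_loop_eq requests [] 0 [] [] (Nat.le_refl 0)
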